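-- pv_equiv track=rewrite | github.com/mguomanila/programming_tests | lesson5/passing_cars.py | soln3
-- ===== SOURCE A (Python) =====
-- def soln3(A):
--     passing, exceed = 0, 10**9
--     n,count = len(A),0
--     for i in range(n-1):
--         for j in range(i+1,n):
--             if A[i]==1:
--                 break
--             if A[i]==0 and A[j]==1:
--                 count += 1
--             if count > exceed: return -1
--     return count
-- ===== SOURCE B (Python) =====
-- def soln3(A):
--     zeros = 0
--     count = 0
--     for x in A:
--         if x == 0:
--             zeros += 1
--         elif x == 1:
--             count += zeros
--     return -1 if count > 10**9 else count
-- ===== Notes on version B (the rewrite author's own statement) =====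
-- stated objective: faster
-- what changed: Replaced the O(n^2) nested index loops (for each zero, scanning all later elements for ones) by a single left-to-right pass that keeps a zeros-so-far counter and adds it on each 1, with the same >1e9 -> -1 cap applied at the end.
import Mathlib
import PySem

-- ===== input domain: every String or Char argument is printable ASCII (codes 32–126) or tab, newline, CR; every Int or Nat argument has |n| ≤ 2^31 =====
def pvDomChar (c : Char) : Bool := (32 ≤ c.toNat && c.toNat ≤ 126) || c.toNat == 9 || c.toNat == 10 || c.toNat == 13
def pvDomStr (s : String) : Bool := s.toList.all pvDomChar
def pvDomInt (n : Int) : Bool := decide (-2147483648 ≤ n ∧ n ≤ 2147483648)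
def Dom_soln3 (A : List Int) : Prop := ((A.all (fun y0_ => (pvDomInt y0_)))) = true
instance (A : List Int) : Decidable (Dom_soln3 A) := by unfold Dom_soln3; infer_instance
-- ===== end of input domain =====

-- B replaces A's O(n^2) nested index scans by one zeros-so-far pass (objective: faster, asymptotic).

-- ===== PORT A =====
-- inner loop 'for j in range(i+1, n): …' (break / counting / cap check, in source order);
-- .error r = the Python 'return -1' escaping both loops
def innerA (xs : List Int) (i exceed : Int) : List Int → Int → Except Int Int
  | [], count => .ok count
  | j :: js, count =>
    if PySem.List.pyGetD xs i 0 = 1 then .ok count            -- if A[i]==1: break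
    else
      let count' := if PySem.List.pyGetD xs i 0 = 0 ∧ PySem.List.pyGetD xs j 0 = 1
                    then count + 1 else count                 -- if A[i]==0 and A[j]==1: count += 1
      if count' > exceed then .error (-1)                     -- if count > exceed: return -1
      else innerA xs i exceed js count'

-- outer loop 'for i in range(n-1): …'
def outerA (xs : List Int) (exceed : Int) : List Int → Int → Except Int Int
  | [], count => .ok count
  | i :: is, count =>
    match innerA xs i exceed (PySem.List.pyRange (i + 1) xs.length 1) count with
    | .error r => .error r
    | .ok c => outerA xs exceed is c

def soln3 (A : List Int) : Int :=
  let exceed : Int := 10 ^ 9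
  let n : Int := A.length
  match outerA A exceed (PySem.List.pyRange 0 (n - 1) 1) 0 with
  | .error r => r
  | .ok count => count

-- ===== PORT B =====
def soln3_alt (A : List Int) : Int :=
  let zc := A.foldl
    (fun (zc : Int × Int) x =>
      if x = 0 then (zc.1 + 1, zc.2)
      else if x = 1 then (zc.1, zc.2 + zc.1)
      else zc) (0, 0)
  if zc.2 > 10 ^ 9 then -1 else zc.2

-- ===== PRECONDITION & SPEC =====
def Spec_soln3 (A : List Int) (out : Int) : Prop := out = soln3_alt A
instance (A : List Int) (out : Int) : Decidable (Spec_soln3 A out) := by unfold Spec_soln3; infer_instance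

-- ===== CLAIM (what is proved, stated in full; the proofs are below) =====
def Claim_equal_soln3 : Prop := ∀ (A : List Int), Dom_soln3 A → Spec_soln3 A (soln3 A)

-- ===== LEMMAS AND PROOFS =====

-- number of 1-entries
def onesI : List Int → Int
  | [] => 0
  | x :: r => (if x = 1 then 1 else 0) + onesI r

-- number of (0 before 1) pairs
def pairsI : List Int → Int
  | [] => 0
  | x :: r => (if x = 0 then onesI r else 0) + pairsI r

lemma onesI_nonneg (l : List Int) : 0 ≤ onesI l := by
  induction l with
  | nil => simp [onesI]
  | cons x r ih => simp only [onesI]; split <;> omega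

lemma pairsI_nonneg (l : List Int) : 0 ≤ pairsI l := by
  induction l with
  | nil => simp [pairsI]
  | cons x r ih =>
    have := onesI_nonneg r
    simp only [pairsI]; split <;> omega

lemma pairsI_short (l : List Int) (h : l.length ≤ 1) : pairsI l = 0 := by
  match l, h with
  | [], _ => rfl
  | [x], _ => simp [pairsI, onesI]

-- per-position contribution of A's inner loop
def contrib (xs : List Int) (i j : Nat) : Int :=
  if xs.getD i 0 = 0 then onesI (xs.drop j) else 0

lemma contrib_nonneg (xs : List Int) (i j : Nat) : 0 ≤ contrib xs i j := by
  unfold contrib; split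
  · exact onesI_nonneg _
  · exact le_refl 0

lemma inner_spec (xs : List Int) (exceed : Int) (i : Nat) :
    ∀ (j : Nat), i < j → ∀ c : Int, c ≤ exceed →
      innerA xs (i : Int) exceed (PySem.List.pyRange (j : Int) (xs.length : Int) 1) c =
        (if xs.getD i 0 = 1 then .ok c
         else if c + contrib xs i j > exceed then .error (-1)
         else .ok (c + contrib xs i j)) := by
  intro j
  induction hn : xs.length - j generalizing j with
  | zero =>
    intro _ c hc
    have hjn : xs.length ≤ j := by omega
    rw [PySem.List.pyRange_one_eq_nil (by exact_mod_cast hjn)]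
    have hdrop : xs.drop j = [] := List.drop_eq_nil_of_le hjn
    have hc0 : contrib xs i j = 0 := by unfold contrib; rw [hdrop]; split <;> rfl
    have hno : ¬ (c + 0 > exceed) := by omega
    simp [innerA, hc0]
    exact fun _ => hc
  | succ k ih =>
    intro hij c hc
    have hjn : j < xs.length := by omega
    rw [PySem.List.pyRange_one_cons (by exact_mod_cast hjn)]
    have hxi : PySem.List.pyGetD xs (i : Int) 0 = xs.getD i 0 := by
      simp [PySem.List.pyGetD_natCast, List.getD]
    have hxj : PySem.List.pyGetD xs (j : Int) 0 = xs[j] := by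
      simp [PySem.List.pyGetD_natCast, List.getD, List.getElem?_eq_getElem hjn]
    have hdrop : xs.drop j = xs[j] :: xs.drop (j + 1) := List.drop_eq_getElem_cons hjn
    have hcast : ((j : Int) + 1) = ((j + 1 : Nat) : Int) := by push_cast; ring
    simp only [innerA, hxi, hxj]
    by_cases h1 : xs.getD i 0 = 1
    · rw [if_pos h1, if_pos h1]
    · rw [if_neg h1, if_neg h1]
      have ht : contrib xs i j =
          (if xs.getD i 0 = 0 ∧ xs[j] = 1 then 1 else 0) + contrib xs i (j + 1) := by
        unfold contrib
        rw [hdrop]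
        by_cases h0 : xs.getD i 0 = 0
        · rw [if_pos h0, if_pos h0]
          simp only [onesI]
          by_cases hj1 : xs[j] = 1
          · rw [if_pos hj1, if_pos ⟨h0, hj1⟩]
          · rw [if_neg hj1, if_neg (by tauto)]
        · rw [if_neg h0, if_neg h0, if_neg (by tauto)]
          norm_num
      set d : Int := if xs.getD i 0 = 0 ∧ xs[j] = 1 then 1 else 0 with hd
      have hd01 : d = 0 ∨ d = 1 := by rw [hd]; split <;> simp
      have hcnt : (if xs.getD i 0 = 0 ∧ xs[j] = 1 then c + 1 else c) = c + d := by
        rw [hd]; split <;> ring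
      rw [hcnt]
      have htc := contrib_nonneg xs i (j + 1)
      by_cases hover : c + d > exceed
      · rw [if_pos hover, if_pos (show c + contrib xs i j > exceed by omega)]
      · rw [if_neg hover, hcast, ih (j + 1) (by omega) (by omega) (c + d) (by omega),
          if_neg h1]
        have heq : c + d + contrib xs i (j + 1) = c + contrib xs i j := by
          rw [ht]; ring
        rw [heq]

lemma outer_spec (xs : List Int) (exceed : Int) :
    ∀ (i : Nat) (c : Int), c ≤ exceed →
      outerA xs exceed (PySem.List.pyRange (i : Int) ((xs.length : Int) - 1) 1) c =
        (if c + pairsI (xs.drop i) > exceed then .error (-1)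
         else .ok (c + pairsI (xs.drop i))) := by
  intro i
  induction hn : xs.length - i generalizing i with
  | zero =>
    intro c hc
    have hin : xs.length ≤ i := by omega
    rw [PySem.List.pyRange_one_eq_nil (by
      have : (xs.length : Int) ≤ (i : Int) := by exact_mod_cast hin
      omega)]
    have hdrop : xs.drop i = [] := List.drop_eq_nil_of_le hin
    simp only [outerA, hdrop, pairsI]
    rw [if_neg (show ¬ (c + 0 > exceed) by omega)]
    simp
  | succ k ih =>
    intro c hc
    have hin : i < xs.length := by omega
    by_cases hlast : (i : Int) < (xs.length : Int) - 1
    · rw [PySem.List.pyRange_one_cons hlast]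
      simp only [outerA]
      have hcast : ((i : Int) + 1) = ((i + 1 : Nat) : Int) := by push_cast; ring
      rw [hcast, inner_spec xs exceed i (i + 1) (by omega) c hc]
      have hdrop : xs.drop i = xs[i] :: xs.drop (i + 1) := List.drop_eq_getElem_cons hin
      have hgd : xs.getD i 0 = xs[i] := by
        simp [List.getD, List.getElem?_eq_getElem hin]
      have hp : pairsI (xs.drop i) = contrib xs i (i + 1) + pairsI (xs.drop (i + 1)) := by
        rw [hdrop]; unfold contrib; rw [hgd]; simp [pairsI]
      have hpn := pairsI_nonneg (xs.drop (i + 1))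
      have htc := contrib_nonneg xs i (i + 1)
      by_cases h1 : xs.getD i 0 = 1
      · -- A[i]=1: inner loop breaks immediately, contribution 0
        have hc0 : contrib xs i (i + 1) = 0 := by unfold contrib; rw [h1]; norm_num
        rw [if_pos h1]
        simp only []
        rw [ih (i + 1) (by omega) c hc, hp, hc0, zero_add]
      · rw [if_neg h1]
        by_cases hover : c + contrib xs i (i + 1) > exceed
        · rw [if_pos hover]
          simp only []
          rw [if_pos (show c + pairsI (xs.drop i) > exceed by omega)]
        · rw [if_neg hover]
          simp only []
          rw [ih (i + 1) (by omega) (c + contrib xs i (i + 1)) (by omega), hp]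
          have : c + contrib xs i (i + 1) + pairsI (xs.drop (i + 1)) =
              c + (contrib xs i (i + 1) + pairsI (xs.drop (i + 1))) := by ring
          rw [this]
    · -- i ≥ n-1: range empty and at most one element is left, which contributes nothing
      rw [PySem.List.pyRange_one_eq_nil (by omega)]
      have hlen : (xs.drop i).length ≤ 1 := by
        rw [List.length_drop]
        have : (i : Int) ≥ (xs.length : Int) - 1 := by omega
        omega
      simp only [outerA]
      rw [pairsI_short _ hlen, if_neg (show ¬ (c + 0 > exceed) by omega)]
      simp

-- number of 0-entries, for B's fold invariant
def zerosI : List Int → Int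
  | [] => 0
  | x :: r => (if x = 0 then 1 else 0) + zerosI r

lemma alt_fold (xs : List Int) : ∀ (z c : Int),
    xs.foldl (fun (zc : Int × Int) x =>
        if x = 0 then (zc.1 + 1, zc.2)
        else if x = 1 then (zc.1, zc.2 + zc.1)
        else zc) (z, c) =
      (z + zerosI xs, c + z * onesI xs + pairsI xs) := by
  induction xs with
  | nil => intro z c; simp [zerosI, onesI, pairsI]
  | cons x r ih =>
    intro z c
    simp only [List.foldl_cons]
    by_cases h0 : x = 0
    · rw [if_pos h0, ih]
      simp only [zerosI, onesI, pairsI, h0, Prod.mk.injEq]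
      norm_num
      try constructor
      all_goals ring
    · rw [if_neg h0]
      by_cases h1 : x = 1
      · rw [if_pos h1, ih]
        simp only [zerosI, onesI, pairsI, h1, Prod.mk.injEq]
        norm_num
        try constructor
        all_goals ring
      · rw [if_neg h1, ih]
        simp only [zerosI, onesI, pairsI, h0, h1, Prod.mk.injEq, if_false]
        try constructor
        all_goals ring

lemma alt_eq (A : List Int) :
    soln3_alt A = if pairsI A > 10 ^ 9 then -1 else pairsI A := by
  unfold soln3_alt
  rw [alt_fold A 0 0]
  simp

-- ===== VERDICT (by name: the statement is the Claim_ definition above) =====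
theorem soln3_spec : Claim_equal_soln3 := by
  intro A _
  unfold Spec_soln3
  have h := outer_spec A (10 ^ 9) 0 0 (by norm_num)
  simp only [Nat.cast_zero, List.drop_zero, zero_add] at h
  rw [alt_eq]
  show (match outerA A (10 ^ 9) (PySem.List.pyRange 0 ((A.length : Int) - 1) 1) 0 with
        | .error r => r
        | .ok count => count) = _
  rw [h]
  by_cases hp : pairsI A > 10 ^ 9
  · rw [if_pos hp, if_pos hp]
  · rw [if_neg hp, if_neg hp]
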